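-- pv_equiv track=rewrite | github.com/Crash1995/release-audit | scripts/write_audit_report.py | build_category_sections
-- ===== SOURCE A (Python) =====
-- SEVERITY_LABELS = {
--     "P0": "Critical",
--     "P1": "High",
--     "P2": "Medium",
--     "P3": "Low",
-- }
--
-- SEVERITY_ORDER = ("P0", "P1", "P2", "P3")
--
-- CATEGORY_ORDER = (
--     "Bugs and Logic Errors",
--     "Security",
--     "Performance and Memory",
--     "Data Leaks",
--     "Code Quality",
--     "Technical Debt",
--     "Dependencies and Configuration",
--     "Cleanup",
-- )
--
-- def format_finding(finding: dict[str, object]) -> str: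
--     """Форматирует один finding в Markdown-блок отчёта."""
--     rule = str(finding.get("rule", "unknown"))
--     severity = SEVERITY_LABELS.get(str(finding.get("severity", "")), str(finding.get("severity", "")))
--     path = str(finding.get("path", "."))
--     line = finding.get("line")
--     location = f"{path}:{line}" if line else path
--     title = str(finding.get("title", rule))
--     description = str(finding.get("description", "")).strip()
--     impact = str(finding.get("impact", "")).strip()
--     suggested_fix = str(finding.get("suggested_fix", "")).strip()
--     snippet = str(finding.get("snippet", "")).strip()
--     lines = [
--         f"- [{severity}] {title} :: {location}",
--         f"  Rule: `{rule}`",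
--     ]
--     if description:
--         lines.append(f"  Description: {description}")
--     if impact:
--         lines.append(f"  Why it matters: {impact}")
--     if suggested_fix:
--         lines.append(f"  Suggested fix: {suggested_fix}")
--     if snippet:
--         lines.append(f"  Evidence: `{snippet}`")
--     return "\n".join(lines)
--
-- def build_section_findings(
--     findings: list[dict[str, object]],
--     category: str,
--     severity: str,
-- ) -> list[dict[str, object]]:
--     """Фильтрует findings по категории и severity для секции отчёта."""
--     return [
--         finding
--         for finding in findings
--         if finding.get("category") == category and finding.get("severity") == severity
--     ]
--
-- def build_category_sections(findings: list[dict[str, object]]) -> list[str]: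
--     """Строит category/severity секции findings."""
--     lines: list[str] = []
--     for category in CATEGORY_ORDER:
--         category_findings = [item for item in findings if item.get("category") == category]
--         lines.extend(["", f"## {category}", ""])
--         if not category_findings:
--             lines.append("No issues found.")
--             continue
--         for severity in SEVERITY_ORDER:
--             severity_findings = build_section_findings(findings, category, severity)
--             if not severity_findings:
--                 continue
--             lines.extend([f"### {SEVERITY_LABELS[severity]}", ""])
--             lines.extend(format_finding(item) for item in severity_findings)
--             lines.append("")
--     return lines
-- ===== SOURCE B (Python) =====
-- SEVERITY_LABELS = {
--     "P0": "Critical",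
--     "P1": "High",
--     "P2": "Medium",
--     "P3": "Low",
-- }
--
-- SEVERITY_ORDER = ("P0", "P1", "P2", "P3")
--
-- CATEGORY_ORDER = (
--     "Bugs and Logic Errors",
--     "Security",
--     "Performance and Memory",
--     "Data Leaks",
--     "Code Quality",
--     "Technical Debt",
--     "Dependencies and Configuration",
--     "Cleanup",
-- )
--
-- def format_finding(finding: dict[str, object]) -> str:
--     rule = str(finding.get("rule", "unknown"))
--     severity = SEVERITY_LABELS.get(str(finding.get("severity", "")), str(finding.get("severity", "")))
--     path = str(finding.get("path", "."))
--     line = finding.get("line")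
--     location = f"{path}:{line}" if line else path
--     title = str(finding.get("title", rule))
--     description = str(finding.get("description", "")).strip()
--     impact = str(finding.get("impact", "")).strip()
--     suggested_fix = str(finding.get("suggested_fix", "")).strip()
--     snippet = str(finding.get("snippet", "")).strip()
--     lines = [
--         f"- [{severity}] {title} :: {location}",
--         f"  Rule: `{rule}`",
--     ]
--     if description:
--         lines.append(f"  Description: {description}")
--     if impact:
--         lines.append(f"  Why it matters: {impact}")
--     if suggested_fix:
--         lines.append(f"  Suggested fix: {suggested_fix}")
--     if snippet:
--         lines.append(f"  Evidence: `{snippet}`")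
--     return "\n".join(lines)
--
-- def build_category_sections(findings: list[dict[str, object]]) -> list[str]:
--     """Single bucketing pass; sections are emitted from table lookups."""
--     buckets: dict[tuple[object, object], list[dict[str, object]]] = {}
--     present: set[object] = set()
--     for finding in findings:
--         cat = finding.get("category")
--         present.add(cat)
--         buckets.setdefault((cat, finding.get("severity")), []).append(finding)
--     lines: list[str] = []
--     for category in CATEGORY_ORDER:
--         lines.extend(["", f"## {category}", ""])
--         if category not in present:
--             lines.append("No issues found.")
--             continue
--         for severity in SEVERITY_ORDER:
--             severity_findings = buckets.get((category, severity), [])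
--             if not severity_findings:
--                 continue
--             lines.extend([f"### {SEVERITY_LABELS[severity]}", ""])
--             lines.extend(format_finding(item) for item in severity_findings)
--             lines.append("")
--     return lines
-- ===== Notes on version B (the rewrite author's own statement) =====
-- stated objective: alternative
-- what changed: B replaces A's per-category and per-(category,severity) rescans of the whole findings list by a single bucketing pass that builds a (category,severity)->findings dict and a set of present categories, then emits sections via table lookups.
import Mathlib
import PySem

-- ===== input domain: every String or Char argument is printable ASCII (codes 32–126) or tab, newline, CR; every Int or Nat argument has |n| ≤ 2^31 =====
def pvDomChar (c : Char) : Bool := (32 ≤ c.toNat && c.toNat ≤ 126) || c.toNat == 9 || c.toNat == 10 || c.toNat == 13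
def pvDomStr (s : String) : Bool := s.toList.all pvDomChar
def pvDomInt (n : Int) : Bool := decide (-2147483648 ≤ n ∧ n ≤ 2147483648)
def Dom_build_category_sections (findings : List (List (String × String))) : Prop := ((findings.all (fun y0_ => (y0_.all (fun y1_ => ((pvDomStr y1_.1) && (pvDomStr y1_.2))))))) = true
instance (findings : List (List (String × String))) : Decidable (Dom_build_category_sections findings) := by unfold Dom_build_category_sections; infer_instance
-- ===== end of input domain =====

-- B builds, in one pass, a (category,severity)->findings dict and a set of present
-- categories, replacing A's repeated rescans of the findings list; sections are then
-- emitted from table lookups. Same return value; objective: alternative single-pass bucketing.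

-- shared module constants and the shared formatting helper (same in both Pythons)
def severityLabels : PySem.Dict String String :=
  PySem.Dict.ofList [("P0", "Critical"), ("P1", "High"), ("P2", "Medium"), ("P3", "Low")]

def severityOrder : List String := ["P0", "P1", "P2", "P3"]

def categoryOrder : List String :=
  ["Bugs and Logic Errors", "Security", "Performance and Memory", "Data Leaks",
   "Code Quality", "Technical Debt", "Dependencies and Configuration", "Cleanup"]

def format_finding (finding : List (String × String)) : String :=
  let f := PySem.Dict.mk finding
  let rule := f.getD "rule" "unknown"
  let severity := severityLabels.getD (f.getD "severity" "") (f.getD "severity" "")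
  let path := f.getD "path" "."
  let line := f.get? "line"
  let location := match line with          -- 'if line': None and "" are falsy
    | some l => if l == "" then path else path ++ ":" ++ l
    | none => path
  let title := f.getD "title" rule
  let description := PySem.Str.strip (f.getD "description" "")
  let impact := PySem.Str.strip (f.getD "impact" "")
  let suggested_fix := PySem.Str.strip (f.getD "suggested_fix" "")
  let snippet := PySem.Str.strip (f.getD "snippet" "")
  let lines := ["- [" ++ severity ++ "] " ++ title ++ " :: " ++ location,
                "  Rule: `" ++ rule ++ "`"]
  let lines := if description == "" then lines else lines ++ ["  Description: " ++ description]
  let lines := if impact == "" then lines else lines ++ ["  Why it matters: " ++ impact]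
  let lines := if suggested_fix == "" then lines else lines ++ ["  Suggested fix: " ++ suggested_fix]
  let lines := if snippet == "" then lines else lines ++ ["  Evidence: `" ++ snippet ++ "`"]
  PySem.Str.join "\n" lines

-- ===== PORT A =====
def build_section_findings (findings : List (List (String × String)))
    (category severity : String) : List (List (String × String)) :=
  findings.filter (fun finding =>
    (PySem.Dict.mk finding).get? "category" == some category &&
    (PySem.Dict.mk finding).get? "severity" == some severity)

def build_category_sections (findings : List (List (String × String))) : List String :=
  categoryOrder.foldl (fun lines category =>
    let category_findings :=
      findings.filter (fun item => (PySem.Dict.mk item).get? "category" == some category)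
    let lines := lines ++ ["", "## " ++ category, ""]
    if category_findings.isEmpty then
      lines ++ ["No issues found."]
    else
      severityOrder.foldl (fun lines severity =>
        let severity_findings := build_section_findings findings category severity
        if severity_findings.isEmpty then lines
        else lines ++ ["### " ++ severityLabels.getD severity "", ""]
                   ++ severity_findings.map format_finding ++ [""]) lines) []

-- ===== PORT B =====
def build_category_sections_alt (findings : List (List (String × String))) : List String :=
  let st := findings.foldl
    (fun (st : PySem.Dict (Option String × Option String) (List (List (String × String)))
              × PySem.Set (Option String)) finding =>
      let cat := (PySem.Dict.mk finding).get? "category"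
      let sev := (PySem.Dict.mk finding).get? "severity"
      (st.1.modify (cat, sev) [] (· ++ [finding]), PySem.Set.add st.2 cat))
    (PySem.Dict.empty, PySem.Set.empty)
  let buckets := st.1
  let present := st.2
  categoryOrder.foldl (fun lines category =>
    let lines := lines ++ ["", "## " ++ category, ""]
    if PySem.Set.contains present (some category) then
      severityOrder.foldl (fun lines severity =>
        let severity_findings := buckets.getD (some category, some severity) []
        if severity_findings.isEmpty then lines
        else lines ++ ["### " ++ severityLabels.getD severity "", ""]
                   ++ severity_findings.map format_finding ++ [""]) lines
    else
      lines ++ ["No issues found."]) []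

-- ===== PRECONDITION & SPEC =====
def Spec_build_category_sections (findings : List (List (String × String))) (out : List String) : Prop := out = build_category_sections_alt findings
instance (findings : List (List (String × String))) (out : List String) : Decidable (Spec_build_category_sections findings out) := by unfold Spec_build_category_sections; infer_instance

-- ===== CLAIM (what is proved, stated in full; the proofs are below) =====
def Claim_equal_build_category_sections : Prop := ∀ (findings : List (List (String × String))), Dom_build_category_sections findings → Spec_build_category_sections findings (build_category_sections findings)

-- ===== LEMMAS AND PROOFS =====

-- abbreviations for the two looked-up fields and B's loop body (proof-side only)
def catOf (f : List (String × String)) : Option String := (PySem.Dict.mk f).get? "category"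
def sevOf (f : List (String × String)) : Option String := (PySem.Dict.mk f).get? "severity"

def bStep (st : PySem.Dict (Option String × Option String) (List (List (String × String)))
               × PySem.Set (Option String)) (finding : List (String × String)) :=
  (st.1.modify (catOf finding, sevOf finding) [] (· ++ [finding]),
   PySem.Set.add st.2 (catOf finding))

-- buckets invariant: the (c,s) bucket is exactly the in-order filter of the input
theorem bucket_getD (findings : List (List (String × String)))
    (d : PySem.Dict (Option String × Option String) (List (List (String × String))))
    (s : PySem.Set (Option String)) (k : Option String × Option String) :
    ((findings.foldl bStep (d, s)).1).getD k []
      = d.getD k [] ++ findings.filter (fun f => (catOf f, sevOf f) == k) := by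
  induction findings generalizing d s with
  | nil => simp
  | cons f t ih =>
    simp only [List.foldl_cons, List.filter_cons]
    rw [show (List.foldl bStep (bStep (d, s) f) t) = (List.foldl bStep ((bStep (d,s) f).1, (bStep (d,s) f).2) t) by rfl]
    rw [ih]
    simp only [bStep, PySem.Dict.getD_modify]
    by_cases h : k = (catOf f, sevOf f)
    · simp [h]
    · have h' : ((catOf f, sevOf f) == k) = false := by
        simpa [beq_iff_eq] using fun hc => h hc.symm
      simp [h, h']

-- present-set invariant
theorem present_mem (findings : List (List (String × String)))
    (d : PySem.Dict (Option String × Option String) (List (List (String × String))))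
    (s : PySem.Set (Option String)) (x : Option String) :
    x ∈ (findings.foldl bStep (d, s)).2 ↔ x ∈ s ∨ ∃ f ∈ findings, catOf f = x := by
  induction findings generalizing d s with
  | nil => simp
  | cons f t ih =>
    simp only [List.foldl_cons]
    rw [show (List.foldl bStep (bStep (d, s) f) t) = (List.foldl bStep ((bStep (d,s) f).1, (bStep (d,s) f).2) t) by rfl]
    rw [ih]
    simp only [bStep, PySem.Set.mem_add, List.mem_cons]
    constructor
    · rintro ((h | h) | ⟨g, hg, hx⟩)
      · exact Or.inl h
      · exact Or.inr ⟨f, Or.inl rfl, h.symm⟩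
      · exact Or.inr ⟨g, Or.inr hg, hx⟩
    · rintro (h | ⟨g, (rfl | hg), hx⟩)
      · exact Or.inl (Or.inl h)
      · exact Or.inl (Or.inr hx.symm)
      · exact Or.inr ⟨g, hg, hx⟩

-- the two filter predicates A and B use coincide
theorem filter_pred_eq (findings : List (List (String × String))) (category severity : String) :
    findings.filter (fun f => (catOf f, sevOf f) == (some category, some severity))
      = build_section_findings findings category severity := by
  unfold build_section_findings
  apply List.filter_congr
  intro f _
  rfl

-- A's emptiness test agrees with B's set membership
theorem present_iff (findings : List (List (String × String))) (category : String) :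
    (PySem.Set.contains ((findings.foldl bStep (PySem.Dict.empty, PySem.Set.empty)).2)
        (some category)) = true
      ↔ ¬ (findings.filter
            (fun item => (PySem.Dict.mk item).get? "category" == some category)).isEmpty := by
  rw [PySem.Set.contains_iff, present_mem]
  simp [List.isEmpty_iff, List.filter_eq_nil_iff, catOf, PySem.Set.empty]

-- the two per-category fold bodies, written out (proof-side)
def aCatStep (findings : List (List (String × String))) (lines : List String)
    (category : String) : List String :=
  let category_findings :=
    findings.filter (fun item => (PySem.Dict.mk item).get? "category" == some category)
  let lines := lines ++ ["", "## " ++ category, ""]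
  if category_findings.isEmpty then
    lines ++ ["No issues found."]
  else
    severityOrder.foldl (fun lines severity =>
      let severity_findings := build_section_findings findings category severity
      if severity_findings.isEmpty then lines
      else lines ++ ["### " ++ severityLabels.getD severity "", ""]
                 ++ severity_findings.map format_finding ++ [""]) lines

def bCatStep (findings : List (List (String × String))) (lines : List String)
    (category : String) : List String :=
  let lines := lines ++ ["", "## " ++ category, ""]
  if PySem.Set.contains ((findings.foldl bStep (PySem.Dict.empty, PySem.Set.empty)).2)
      (some category) then
    severityOrder.foldl (fun lines severity =>
      let severity_findings :=
        ((findings.foldl bStep (PySem.Dict.empty, PySem.Set.empty)).1).getD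
          (some category, some severity) []
      if severity_findings.isEmpty then lines
      else lines ++ ["### " ++ severityLabels.getD severity "", ""]
                 ++ severity_findings.map format_finding ++ [""]) lines
  else
    lines ++ ["No issues found."]

theorem catStep_eq (findings : List (List (String × String))) (lines : List String)
    (category : String) : aCatStep findings lines category = bCatStep findings lines category := by
  unfold aCatStep bCatStep
  by_cases hp : (PySem.Set.contains ((findings.foldl bStep (PySem.Dict.empty, PySem.Set.empty)).2)
      (some category)) = true
  · rw [if_pos hp]
    have he := (present_iff findings category).mp hp
    rw [if_neg (by simpa using he)]
    apply List.foldl_ext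
    intro lines' severity _
    rw [bucket_getD, filter_pred_eq]
    simp [PySem.Dict.getD_empty]
  · rw [Bool.not_eq_true] at hp
    rw [hp]
    have he : (findings.filter
        (fun item => (PySem.Dict.mk item).get? "category" == some category)).isEmpty := by
      by_contra h
      have hc := (present_iff findings category).mpr h
      rw [hp] at hc
      exact Bool.noConfusion hc
    simp only [if_pos he, Bool.false_eq_true, if_false]

-- ===== VERDICT (by name: the statement is the Claim_ definition above) =====
theorem build_category_sections_spec : Claim_equal_build_category_sections := by
  intro findings _
  unfold Spec_build_category_sections
  have hA : build_category_sections findings = categoryOrder.foldl (aCatStep findings) [] := rfl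
  have hB : build_category_sections_alt findings = categoryOrder.foldl (bCatStep findings) [] := rfl
  rw [hA, hB]
  apply List.foldl_ext
  intro lines category _
  exact catStep_eq findings lines category
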